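-- pv_equiv track=rewrite | github.com/victorsada/practica | tarea.py | obtenerPersonasPorCiudad
-- ===== SOURCE A (Python) =====
-- def obtenerPersonasPorCiudad(personas):
--   resultado = {}
--   for persona in personas:
--     if persona["ciudad"] not in resultado:
--       resultado[persona["ciudad"]] = [persona["nombre"]]
--     else:
--       resultado[persona["ciudad"]].append(persona["nombre"])
--
--   return resultado
-- ===== SOURCE B (Python) =====
-- def obtenerPersonasPorCiudad(personas):
--   # Two-pass nested scan: collect distinct cities in first-seen order, then
--   # for each city gather the names with a comprehension over the whole list.
--   ciudades = list(dict.fromkeys(p["ciudad"] for p in personas))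
--   return {c: [p["nombre"] for p in personas if p["ciudad"] == c] for c in ciudades}
-- ===== Notes on version B (the rewrite author's own statement) =====
-- stated objective: alternative
-- what changed: Replaced the single-pass hash-grouping (build dict, branch on key presence, append) by a two-pass nested scan: dedup the cities once, then one comprehension per city over the whole list.
import Mathlib
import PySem

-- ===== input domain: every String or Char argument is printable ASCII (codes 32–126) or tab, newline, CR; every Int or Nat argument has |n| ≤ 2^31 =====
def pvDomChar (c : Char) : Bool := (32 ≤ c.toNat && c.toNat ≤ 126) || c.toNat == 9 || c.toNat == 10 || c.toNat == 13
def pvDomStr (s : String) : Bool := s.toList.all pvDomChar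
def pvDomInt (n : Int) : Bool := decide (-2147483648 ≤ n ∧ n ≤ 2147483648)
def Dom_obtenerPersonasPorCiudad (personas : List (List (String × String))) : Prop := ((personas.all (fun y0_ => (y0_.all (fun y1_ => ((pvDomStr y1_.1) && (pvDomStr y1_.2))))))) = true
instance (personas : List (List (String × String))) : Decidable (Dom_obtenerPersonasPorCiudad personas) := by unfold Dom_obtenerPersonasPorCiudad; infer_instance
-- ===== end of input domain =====

-- B replaces A's single-pass hash grouping by a dedup-then-nested-scan decomposition (alternative, not faster).

-- persona[k]: first-match lookup in the association list; Pre_ guarantees the key is present,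
-- so the "" default is never reached on admitted inputs.
def pvLook (p : List (String × String)) (k : String) : String :=
  ((PySem.Dict.ofList p).get? k).getD ""

-- ===== PORT A =====
def obtenerPersonasPorCiudad (personas : List (List (String × String))) : List (String × List String) :=
  (personas.foldl (fun resultado persona =>
      if resultado.contains (pvLook persona "ciudad") = false then
        resultado.insert (pvLook persona "ciudad") [pvLook persona "nombre"]
      else
        resultado.modify (pvLook persona "ciudad") [] (· ++ [pvLook persona "nombre"]))
    PySem.Dict.empty).items

-- ===== PORT B =====
def obtenerPersonasPorCiudad_alt (personas : List (List (String × String))) : List (String × List String) :=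
  let ciudades := PySem.List.dedup (personas.map (fun p => pvLook p "ciudad"))
  ciudades.map (fun c =>
    (c, (personas.filter (fun p => pvLook p "ciudad" == c)).map (fun p => pvLook p "nombre")))

-- ===== PRECONDITION & SPEC =====
-- Pre_ excludes exactly the personas lacking a "ciudad" or "nombre" key, on which the Python A raises KeyError.
def Pre_obtenerPersonasPorCiudad (personas : List (List (String × String))) : Prop :=
  ∀ p ∈ personas, ((PySem.Dict.ofList p).get? "ciudad").isSome ∧ ((PySem.Dict.ofList p).get? "nombre").isSome
instance (personas : List (List (String × String))) : Decidable (Pre_obtenerPersonasPorCiudad personas) := by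
  unfold Pre_obtenerPersonasPorCiudad; infer_instance

def pvWitness_obtenerPersonasPorCiudad : (List (List (String × String))) :=
  [[("ciudad", "Caracas"), ("nombre", "Ana")], [("ciudad", "Lima"), ("nombre", "Bo")],
   [("ciudad", "Caracas"), ("nombre", "Cy")]]

def Spec_obtenerPersonasPorCiudad (personas : List (List (String × String))) (out : List (String × List String)) : Prop := out = obtenerPersonasPorCiudad_alt personas
instance (personas : List (List (String × String))) (out : List (String × List String)) : Decidable (Spec_obtenerPersonasPorCiudad personas out) := by unfold Spec_obtenerPersonasPorCiudad; infer_instance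

-- ===== CLAIM (what is proved, stated in full; the proofs are below) =====
def Claim_equal_obtenerPersonasPorCiudad : Prop := ∀ (personas : List (List (String × String))), Dom_obtenerPersonasPorCiudad personas → Pre_obtenerPersonasPorCiudad personas → Spec_obtenerPersonasPorCiudad personas (obtenerPersonasPorCiudad personas)

-- ===== LEMMAS AND PROOFS =====

-- A's if/else body is exactly Dict.modify (on the missing-key branch modify inserts f []).
lemma body_eq_modify (d : PySem.Dict String (List String)) (c n : String) :
    (if d.contains c = false then d.insert c [n] else d.modify c [] (· ++ [n]))
      = d.modify c [] (· ++ [n]) := by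
  by_cases h : d.contains c = false
  · simp [h, PySem.Dict.modify, PySem.Dict.getD_of_not_contains (h := h)]
  · simp [h]

lemma fold_eq (personas : List (List (String × String))) :
    personas.foldl (fun resultado persona =>
      if resultado.contains (pvLook persona "ciudad") = false then
        resultado.insert (pvLook persona "ciudad") [pvLook persona "nombre"]
      else
        resultado.modify (pvLook persona "ciudad") [] (· ++ [pvLook persona "nombre"]))
      PySem.Dict.empty
    = (personas.map (fun p => (pvLook p "ciudad", pvLook p "nombre"))).foldl
        (fun d q => d.modify q.1 [] (· ++ [q.2])) PySem.Dict.empty := by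
  rw [List.foldl_map]
  apply PySem.List.foldl_congr_mem
  intro acc p _
  exact body_eq_modify acc _ _

-- ===== VERDICT (by name: the statement is the Claim_ definition above) =====
theorem obtenerPersonasPorCiudad_spec : Claim_equal_obtenerPersonasPorCiudad := by
  intro personas _ _
  show _ = _
  unfold obtenerPersonasPorCiudad obtenerPersonasPorCiudad_alt
  rw [fold_eq]
  set l := personas.map (fun p => (pvLook p "ciudad", pvLook p "nombre")) with hl
  have hnd : ((l.foldl (fun d q => d.modify q.1 [] (· ++ [q.2])) PySem.Dict.empty).keys).Nodup := by
    exact PySem.Dict.nodup_keys_foldl_modify_key l Prod.fst [] (fun _ q => (· ++ [q.2])) _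
      PySem.Dict.nodup_keys_empty
  rw [PySem.Dict.items_eq_map_keys _ hnd []]
  have hkeys : (l.foldl (fun d q => d.modify q.1 [] (· ++ [q.2])) PySem.Dict.empty).keys
      = PySem.List.dedup (personas.map (fun p => pvLook p "ciudad")) := by
    rw [PySem.Dict.keys_foldl_modify_key]
    simp [hl, PySem.Set.update, PySem.Set.ofList, List.map_map, PySem.Dict.keys_empty,
      Function.comp_def]
  rw [hkeys]
  apply List.map_congr_left
  intro c _
  rw [PySem.Dict.getD_foldl_modify_append]
  simp [hl, List.filter_map, Function.comp_def]
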